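-- pv_equiv track=rewrite | github.com/dev-shiki/galaxy_ng | .github/scripts/fix_test_files.py | balance_parentheses
-- ===== SOURCE A (Python) =====
-- def balance_parentheses(content):
--     """
--     Automatically balance parentheses, brackets, and braces in code.
--     Uses a stack-based approach to detect and fix mismatches.
--     """
--     lines = content.splitlines()
--     stack = []
--
--     # Track all brackets
--     for i, line in enumerate(lines):
--         for j, char in enumerate(line):
--             if char in '({[':
--                 stack.append((char, i))
--             elif char in ')}]':
--                 if stack and ((char == ')' and stack[-1][0] == '(') or
--                               (char == '}' and stack[-1][0] == '{') or
--                               (char == ']' and stack[-1][0] == '[')):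
--                     stack.pop()
--
--     # Add missing closing brackets
--     if stack:
--         closing = {'(': ')', '{': '}', '[': ']'}
--         line_fixes = {}
--
--         for bracket, line_num in stack:
--             line_fixes.setdefault(line_num, []).append(closing[bracket])
--
--         # Apply fixes in reverse order to avoid affecting line numbers
--         for line_num, closers in sorted(line_fixes.items(), reverse=True):
--             lines[line_num] = lines[line_num] + ''.join(closers)
--
--     return '\n'.join(lines)
-- ===== SOURCE B (Python) =====
-- def balance_parentheses(content):
--     """Single flat pass over the raw text: split lines, match brackets and record
--     the closers each line still needs, all in one character loop; then emit each
--     line with its recorded extra closers attached."""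
--     pairs = {'(': ')', '{': '}', '[': ']'}
--     done = []   # completed lines (strings)
--     cur = []    # characters of the line being read
--     need = []   # stack of (closer, line_index) still waiting to be closed
--     it = iter(content)
--     pending = next(it, None)
--     while pending is not None:
--         ch = pending
--         pending = next(it, None)
--         if ch == '\n' or ch == '\r':
--             if ch == '\r' and pending == '\n':
--                 pending = next(it, None)
--             done.append(''.join(cur))
--             cur = []
--         else:
--             if ch in pairs:
--                 need.append((pairs[ch], len(done)))
--             elif need and ch == need[-1][0]:
--                 need.pop()
--             cur.append(ch)
--     if cur:
--         done.append(''.join(cur))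
--     extra = [''] * len(done)
--     for closer, ln in need:
--         extra[ln] += closer
--     return '\n'.join(line + ext for line, ext in zip(done, extra))
-- ===== Notes on version B (the rewrite author's own statement) =====
-- stated objective: alternative
-- what changed: B replaces A's staged phases (splitlines, a nested per-line/per-char scan building an opener stack, then a line_fixes dict applied in reverse-sorted order) by one flat pass over the raw character stream that splits lines and matches brackets together while recording the needed closer per unmatched opener, then distributes the closers into a per-line extras table and emits the lines by zipping.
import Mathlib
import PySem

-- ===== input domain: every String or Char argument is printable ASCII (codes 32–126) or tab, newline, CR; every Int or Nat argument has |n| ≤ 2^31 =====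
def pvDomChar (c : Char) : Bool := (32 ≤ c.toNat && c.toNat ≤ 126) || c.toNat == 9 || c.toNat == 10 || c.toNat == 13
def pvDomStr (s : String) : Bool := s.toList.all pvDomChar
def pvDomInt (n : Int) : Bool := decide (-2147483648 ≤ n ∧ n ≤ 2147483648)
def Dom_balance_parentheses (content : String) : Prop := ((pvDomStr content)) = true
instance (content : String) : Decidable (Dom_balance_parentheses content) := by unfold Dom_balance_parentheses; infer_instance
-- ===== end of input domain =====

-- B replaces A's two staged phases (splitlines + nested scan building an opener stack,
-- then a line_fixes dict applied in reverse-sorted order) by ONE flat character pass that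
-- splits lines, matches brackets and records needed closers together (objective: alternative).

-- ===== PORT A =====
-- closing[bracket]: the dict {'(':')','{':'}','[':']'} looked up only at '(', '{', '['
def closeOf (c : Char) : Char := if c = '(' then ')' else if c = '{' then '}' else ']'

-- body of the inner 'for j, char in enumerate(line)' loop: push openers (append = at the
-- END of the list, so stack[-1] = getLast), pop a matching top on closers
def bpStep (i : Nat) (st : List (Char × Nat)) (c : Char) : List (Char × Nat) :=
  if c = '(' ∨ c = '{' ∨ c = '[' then st ++ [(c, i)]
  else if c = ')' ∨ c = '}' ∨ c = ']' then
    match st.getLast? with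
    | some t =>
        if (c = ')' ∧ t.1 = '(') ∨ (c = '}' ∧ t.1 = '{') ∨ (c = ']' ∧ t.1 = '[') then
          st.dropLast
        else st
    | none => st
  else st

-- 'for i, line in enumerate(lines): for j, char in enumerate(line): …'
def bpScan (i : Nat) (st : List (Char × Nat)) : List (List Char) → List (Char × Nat)
  | [] => st
  | line :: rest => bpScan (i + 1) (line.foldl (bpStep i) st) rest

def balance_parentheses (content : String) : String :=
  let lines := PySem.Chars.splitlines content.toList
  let stack := bpScan 0 [] lines
  let lines :=
    if stack = [] then lines   -- 'if stack:' — nothing to fix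
    else
      -- line_fixes.setdefault(ln, []).append(closing[b])  ==  modify ln [] (· ++ [closeOf b])
      let line_fixes := stack.foldl
        (fun d (p : Char × Nat) => d.modify p.2 [] (fun v => v ++ [closeOf p.1]))
        PySem.Dict.empty
      -- sorted(items, reverse=True): keys are distinct ints, so Python's tuple comparison
      -- never reaches the second component — sorting by the key alone is exact.
      -- ''.join(closers) is the identity here: values already are lists of chars.
      (PySem.List.sorted line_fixes.items (fun p => p.1) true).foldl
        (fun ls (p : Nat × List Char) => ls.set p.1 (ls.getD p.1 [] ++ p.2)) lines
  String.ofList (PySem.Chars.join ['\n'] lines)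

-- ===== PORT B =====
-- B's while loop over the character iterator, state (done, cur, need); the Python's
-- one-char lookahead 'pending' that swallows the '\n' of a '\r\n' pair is transcribed
-- as the two-character pattern '\r' :: '\n' :: rest.  Exact for the '\n'/'\r'/'\r\n'
-- line breaks that printable-ASCII+tab+NL+CR input can contain.
def bLoop : List Char → List (List Char) → List Char → List (Char × Nat) →
    List (List Char) × List (Char × Nat)
  | [], done, cur, need => ((if cur = [] then done else done ++ [cur]), need)
  | '\r' :: '\n' :: rest, done, cur, need => bLoop rest (done ++ [cur]) [] need
  | c :: rest, done, cur, need =>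
    if c = '\n' ∨ c = '\r' then bLoop rest (done ++ [cur]) [] need
    else if c = '(' ∨ c = '{' ∨ c = '[' then
      bLoop rest done (cur ++ [c]) (need ++ [(closeOf c, done.length)])
    else
      match need.getLast? with
      | some t => if c = t.1 then bLoop rest done (cur ++ [c]) need.dropLast
                  else bLoop rest done (cur ++ [c]) need
      | none => bLoop rest done (cur ++ [c]) need

def balance_parentheses_alt (content : String) : String :=
  let r := bLoop content.toList [] [] []
  let done := r.1
  let need := r.2
  -- extra = ['']*len(done); for closer, ln in need: extra[ln] += closer
  let extra := need.foldl
    (fun ex (p : Char × Nat) => ex.set p.2 (ex.getD p.2 [] ++ [p.1]))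
    (List.replicate done.length [])
  -- '\n'.join(line + ext for line, ext in zip(done, extra))
  String.ofList (PySem.Chars.join ['\n'] ((done.zip extra).map (fun p => p.1 ++ p.2)))

-- ===== PRECONDITION & SPEC =====
def Spec_balance_parentheses (content : String) (out : String) : Prop := out = balance_parentheses_alt content
instance (content : String) (out : String) : Decidable (Spec_balance_parentheses content out) := by unfold Spec_balance_parentheses; infer_instance

-- ===== CLAIM (what is proved, stated in full; the proofs are below) =====
def Claim_equal_balance_parentheses : Prop := ∀ (content : String), Dom_balance_parentheses content → Spec_balance_parentheses content (balance_parentheses content)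

-- ===== LEMMAS AND PROOFS =====

-- a fold of 'ls[k] += v' over keyed items, characterised pointwise
theorem fold_set_append_eq_mapIdx {α : Type} (k : α → Nat) (v : α → List Char)
    (l : List α) (lines : List (List Char)) :
    l.foldl (fun ls p => ls.set (k p) (ls.getD (k p) [] ++ v p)) lines
      = lines.mapIdx (fun i line => line ++ (l.filter (fun p => k p == i)).flatMap v) := by
  induction l generalizing lines with
  | nil => simp; apply List.ext_getElem <;> simp
  | cons p l ih =>
    simp only [List.foldl_cons, ih]
    apply List.ext_getElem
    · simp
    · intro i h1 h2
      simp only [List.getElem_mapIdx, List.getElem_set, List.filter_cons]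
      have hlen : i < lines.length := by simpa using h1
      by_cases hk : k p = i
      · subst hk
        simp [List.getD_eq_getElem?_getD, List.getElem?_eq_getElem hlen]
      · simp [hk, beq_iff_eq]

-- a Nodup-keyed fold of 'lines[k] = lines[k] + v', in ANY order, is the same pointwise map
theorem foldA_eq_mapIdx (g : Nat → List Char) (L : List (Nat × List Char))
    (lines : List (List Char)) (hn : (L.map (·.1)).Nodup) (hg : ∀ p ∈ L, p.2 = g p.1) :
    L.foldl (fun ls (p : Nat × List Char) => ls.set p.1 (ls.getD p.1 [] ++ p.2)) lines
      = lines.mapIdx (fun i line => if i ∈ L.map (·.1) then line ++ g i else line) := by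
  induction L generalizing lines with
  | nil => simp; apply List.ext_getElem <;> simp
  | cons p L ih =>
    simp only [List.map_cons, List.nodup_cons] at hn
    have hv : p.2 = g p.1 := hg p (by simp)
    simp only [List.foldl_cons, ih (lines := _) hn.2 (fun q hq => hg q (by simp [hq]))]
    apply List.ext_getElem
    · simp
    · intro i h1 h2
      simp only [List.getElem_mapIdx, List.getElem_set, List.map_cons, List.mem_cons]
      have hlen : i < lines.length := by simpa using h1
      by_cases hk : p.1 = i
      · subst hk
        have : p.1 ∉ L.map (·.1) := hn.1
        simp [this, hv, List.getD_eq_getElem?_getD, List.getElem?_eq_getElem hlen]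
      · have hik : ¬ i = p.1 := fun h => hk h.symm
        simp only [hik, false_or, if_neg hk]

-- find? on a Nodup-keyed association list finds the pair itself
theorem find?_of_mem_nodup (L : List (Nat × List Char)) (p : Nat × List Char)
    (hn : (L.map (·.1)).Nodup) (hp : p ∈ L) :
    L.find? (fun q => q.1 == p.1) = some p := by
  induction L with
  | nil => simp at hp
  | cons q L ih =>
    simp only [List.map_cons, List.nodup_cons] at hn
    rcases List.mem_cons.1 hp with h | h
    · subst h; simp
    · have hne : ¬(q.1 == p.1) = true := by
        simp only [beq_iff_eq]
        intro he
        exact hn.1 (he ▸ List.mem_map.2 ⟨p, h, rfl⟩)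
      simp [hne, ih hn.2 h]

-- the line numbers in the scan stack are non-decreasing
theorem bpStep_inv (i : Nat) (st : List (Char × Nat)) (c : Char)
    (h1 : ((st.map (·.2)).Pairwise (· ≤ ·))) (h2 : ∀ x ∈ st, x.2 ≤ i) :
    (((bpStep i st c).map (·.2)).Pairwise (· ≤ ·)) ∧ (∀ x ∈ bpStep i st c, x.2 ≤ i) := by
  unfold bpStep
  split_ifs with hop hcl
  · constructor
    · simp only [List.map_append, List.pairwise_append]
      refine ⟨h1, by simp, ?_⟩
      intro a ha b hb
      simp only [List.mem_map] at ha
      obtain ⟨x, hx, rfl⟩ := ha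
      simp only [List.map_cons, List.map_nil, List.mem_singleton] at hb
      subst hb; exact h2 x hx
    · intro x hx
      rcases List.mem_append.1 hx with h | h
      · exact h2 x h
      · simp at h; subst h; exact le_refl i
  · cases hl : st.getLast? with
    | none => exact ⟨h1, h2⟩
    | some t =>
      dsimp only
      split_ifs with hm
      · refine ⟨?_, fun x hx => h2 x (List.Sublist.mem hx (List.dropLast_sublist st))⟩
        have hsub : List.Sublist (st.dropLast.map (·.2)) (st.map (·.2)) :=
          (List.dropLast_sublist st).map _
        exact h1.sublist hsub
      · exact ⟨h1, h2⟩
  · exact ⟨h1, h2⟩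

theorem bpScanLine_inv (i : Nat) (line : List Char) (st : List (Char × Nat))
    (h1 : ((st.map (·.2)).Pairwise (· ≤ ·))) (h2 : ∀ x ∈ st, x.2 ≤ i) :
    (((line.foldl (bpStep i) st).map (·.2)).Pairwise (· ≤ ·)) ∧
      (∀ x ∈ line.foldl (bpStep i) st, x.2 ≤ i) := by
  induction line generalizing st with
  | nil => exact ⟨h1, h2⟩
  | cons c cs ih =>
    have h := bpStep_inv i st c h1 h2
    exact ih _ h.1 h.2

theorem bpScan_inv (lines : List (List Char)) (i : Nat) (st : List (Char × Nat))
    (h1 : ((st.map (·.2)).Pairwise (· ≤ ·))) (h2 : ∀ x ∈ st, x.2 ≤ i) :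
    ((bpScan i st lines).map (·.2)).Pairwise (· ≤ ·) := by
  induction lines generalizing i st with
  | nil => exact h1
  | cons line rest ih =>
    have h := bpScanLine_inv i line st h1 h2
    exact ih (i + 1) _ h.1 (fun x hx => Nat.le_succ_of_le (h.2 x hx))

-- the ordered dedup of a non-decreasing list is strictly increasing
theorem ofList_pairwise_lt (xs : List Nat) (h : xs.Pairwise (· ≤ ·)) :
    (PySem.Set.ofList xs).Pairwise (· < ·) := by
  induction xs with
  | nil => simp [PySem.Set.ofList]
  | cons x xs ih =>
    rw [PySem.Set.ofList_cons]
    simp only [List.pairwise_cons] at h ⊢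
    have hsub : List.Sublist ((PySem.Set.ofList xs).discard x) (PySem.Set.ofList xs) :=
      List.filter_sublist
    constructor
    · intro y hy
      have hmem : y ∈ PySem.Set.ofList xs := List.Sublist.mem hy hsub
      have hyx : y ≠ x := by
        simp only [PySem.Set.discard, List.mem_filter] at hy
        simpa using hy.2
      exact lt_of_le_of_ne (h.1 y ((PySem.Set.mem_ofList xs y).1 hmem)) (Ne.symm hyx)
    · exact (ih h.2).sublist hsub

-- A's fix phase (dict + reverse sort) equals the plain keyed-append fold, for any stack
-- whose line numbers are non-decreasing
theorem fix_eq (lines : List (List Char)) (stack : List (Char × Nat))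
    (hsnd : (stack.map (·.2)).Pairwise (· ≤ ·)) :
    (if stack = [] then lines
     else
       let line_fixes := stack.foldl
         (fun d (p : Char × Nat) => d.modify p.2 [] (fun v => v ++ [closeOf p.1]))
         PySem.Dict.empty
       (PySem.List.sorted line_fixes.items (fun p => p.1) true).foldl
         (fun ls (p : Nat × List Char) => ls.set p.1 (ls.getD p.1 [] ++ p.2)) lines)
      = stack.foldl
          (fun ls (p : Char × Nat) => ls.set p.2 (ls.getD p.2 [] ++ [closeOf p.1])) lines := by
  rcases eq_or_ne stack [] with hs | hs
  · simp [hs]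
  · simp only [if_neg hs]
    set g : Nat → List Char :=
      fun i => (stack.filter (fun p => p.2 == i)).map (fun p => closeOf p.1) with hg
    set d := stack.foldl
      (fun d (p : Char × Nat) => d.modify p.2 [] (fun v => v ++ [closeOf p.1]))
      PySem.Dict.empty with hd
    have hfold : d = (stack.map (fun p => (p.2, closeOf p.1))).foldl
        (fun d (p : Nat × Char) => d.modify p.1 [] (fun v => v ++ [p.2])) PySem.Dict.empty := by
      rw [hd, List.foldl_map]
    have hkeys : d.keys = PySem.Set.ofList (stack.map (·.2)) := by
      rw [hfold, PySem.Dict.keys_foldl_modify_key]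
      have he : (PySem.Dict.empty : PySem.Dict Nat (List Char)).keys = ([] : List Nat) := rfl
      rw [he, PySem.Set.update_nil_left, List.map_map]
      rfl
    have hkeys_lt : d.keys.Pairwise (· < ·) := hkeys ▸ ofList_pairwise_lt _ hsnd
    have hkeys_nodup : (d.items.map (·.1)).Nodup :=
      (hkeys ▸ PySem.Set.nodup_ofList _ : d.keys.Nodup)
    have hgetD : ∀ k, d.getD k [] = g k := by
      intro k
      rw [hfold, PySem.Dict.getD_foldl_modify_append]
      simp [hg, List.filter_map, List.map_map, Function.comp_def]
    have hitems_lt : d.items.Pairwise (fun a b => a.1 < b.1) := by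
      have h' := hkeys_lt
      rwa [show d.keys = d.items.map (·.1) from rfl, List.pairwise_map] at h'
    have hsorted : PySem.List.sorted d.items (fun p => p.1) true = d.items.reverse := by
      apply PySem.List.sorted_rev_eq_of_perm_of_pairwise_gt
      · exact List.reverse_perm _
      · exact List.pairwise_reverse.2 hitems_lt
    rw [hsorted]
    have hrev_nodup : (d.items.reverse.map (·.1)).Nodup := by
      rw [List.map_reverse]; exact List.nodup_reverse.2 hkeys_nodup
    have hrev_g : ∀ p ∈ d.items.reverse, p.2 = g p.1 := by
      intro p hp
      rw [List.mem_reverse] at hp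
      have hfind := find?_of_mem_nodup d.items p hkeys_nodup hp
      have hval : d.getD p.1 [] = p.2 := by
        simp [PySem.Dict.getD, PySem.Dict.get?, hfind]
      rw [← hval, hgetD]
    rw [foldA_eq_mapIdx g _ lines hrev_nodup hrev_g,
      fold_set_append_eq_mapIdx (fun p : Char × Nat => p.2) (fun p => [closeOf p.1])]
    apply List.ext_getElem
    · simp
    · intro i h1 h2
      simp only [List.getElem_mapIdx]
      by_cases hmem : i ∈ d.items.reverse.map (·.1)
      · rw [if_pos hmem, ← List.map_eq_flatMap]
      · have hnot : i ∉ stack.map (·.2) := by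
          intro hc
          apply hmem
          rw [List.map_reverse, List.mem_reverse,
            show d.items.map (·.1) = d.keys from rfl, hkeys]
          exact (PySem.Set.mem_ofList _ _).2 hc
        have hgi : (stack.filter (fun p => p.2 == i)).flatMap
            (fun p : Char × Nat => [closeOf p.1]) = [] := by
          rw [← List.map_eq_flatMap]
          simp only [List.map_eq_nil_iff, List.filter_eq_nil_iff]
          intro p hp hbeq
          exact absurd (List.mem_map.2 ⟨p, hp, by simpa using hbeq⟩) hnot
        rw [if_neg hmem, hgi, List.append_nil]

-- B's per-character bracket update (the non-newline branch of bLoop), on the need stack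
def bNeedStep (i : Nat) (need : List (Char × Nat)) (c : Char) : List (Char × Nat) :=
  if c = '(' ∨ c = '{' ∨ c = '[' then need ++ [(closeOf c, i)]
  else
    match need.getLast? with
    | some t => if c = t.1 then need.dropLast else need
    | none => need

-- a flat character machine: bLoop's line handling with A's bracket step
def amach (i : Nat) (st : List (Char × Nat)) : List Char → List (Char × Nat)
  | [] => st
  | '\r' :: '\n' :: rest => amach (i + 1) st rest
  | c :: rest =>
    if c = '\n' ∨ c = '\r' then amach (i + 1) st rest
    else amach i (bpStep i st c) rest

def mapStack (st : List (Char × Nat)) : List (Char × Nat) :=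
  st.map (fun p => (closeOf p.1, p.2))

def openerInv (st : List (Char × Nat)) : Prop :=
  ∀ p ∈ st, p.1 = '(' ∨ p.1 = '{' ∨ p.1 = '['

theorem step_map (i : Nat) (st : List (Char × Nat)) (c : Char) (hinv : openerInv st) :
    mapStack (bpStep i st c) = bNeedStep i (mapStack st) c ∧ openerInv (bpStep i st c) := by
  unfold bpStep bNeedStep
  by_cases hop : c = '(' ∨ c = '{' ∨ c = '['
  · simp only [if_pos hop]
    refine ⟨by simp [mapStack], ?_⟩
    intro p hp
    rcases List.mem_append.1 hp with h | h
    · exact hinv p h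
    · simp at h; subst h; exact hop
  · simp only [if_neg hop]
    have hlast : (mapStack st).getLast? = st.getLast?.map (fun p => (closeOf p.1, p.2)) := by
      simp [mapStack, List.getLast?_map]
    cases hl : st.getLast? with
    | none =>
      rw [hlast, hl]
      by_cases hcl : c = ')' ∨ c = '}' ∨ c = ']' <;> simp [hcl, hinv]
    | some t =>
      rw [hlast, hl]
      have ht : t.1 = '(' ∨ t.1 = '{' ∨ t.1 = '[' := hinv t (List.mem_of_getLast? hl)
      have hmatch : (c = closeOf t.1) =
          ((c = ')' ∧ t.1 = '(') ∨ (c = '}' ∧ t.1 = '{') ∨ (c = ']' ∧ t.1 = '[')) := by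
        rcases ht with h | h | h <;> rw [h] <;> simp [closeOf]
      have hdropInv : openerInv st.dropLast :=
        fun p hp => hinv p (List.Sublist.mem hp (List.dropLast_sublist st))
      by_cases hcl : c = ')' ∨ c = '}' ∨ c = ']'
      · simp only [if_pos hcl, Option.map_some]
        simp only [hmatch]
        by_cases hm : (c = ')' ∧ t.1 = '(') ∨ (c = '}' ∧ t.1 = '{') ∨ (c = ']' ∧ t.1 = '[')
        · simp only [if_pos hm]
          exact ⟨by simp [mapStack, List.map_dropLast], hdropInv⟩
        · simp only [if_neg hm]
          exact ⟨trivial, hinv⟩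
      · -- c is no bracket at all: closeOf t.1 is a closer, c is not
        simp only [if_neg hcl, Option.map_some]
        have hne : ¬ c = closeOf t.1 := by
          intro h
          apply hcl
          rcases ht with h1 | h1 | h1 <;> rw [h1] at h <;> simp [closeOf] at h <;> tauto
        simp only [if_neg hne]
        exact ⟨trivial, hinv⟩




def pvIsB : Char → Bool :=
  fun c => decide (c.toNat = 10) || decide (c.toNat = 13) || decide (c.toNat = 11) ||
    decide (c.toNat = 12) || decide (c.toNat = 28) || decide (c.toNat = 29) ||
    decide (c.toNat = 30) || decide (c.toNat = 133) || decide (c.toNat = 8232) ||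
    decide (c.toNat = 8233)

theorem splitlines_eq_go (cs : List Char) :
    PySem.Chars.splitlines cs = PySem.Chars.splitlines.go pvIsB cs [] [] := rfl

theorem char_of_toNat_10 (c : Char) (h : c.toNat = 10) : c = '\n' := by
  apply Char.ext
  unfold Char.toNat at h
  exact UInt32.toNat_inj.mp (by simpa using h)

theorem char_of_toNat_13 (c : Char) (h : c.toNat = 13) : c = '\r' := by
  apply Char.ext
  unfold Char.toNat at h
  exact UInt32.toNat_inj.mp (by simpa using h)

theorem isB_false (c : Char) (hd : pvDomChar c = true) (h1 : ¬(c = '\n' ∨ c = '\r')) :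
    pvIsB c = false := by
  simp only [pvDomChar, Bool.or_eq_true, Bool.and_eq_true, decide_eq_true_eq, beq_iff_eq] at hd
  simp only [pvIsB, Bool.or_eq_false_iff, decide_eq_false_iff_not]
  have h10 : c.toNat ≠ 10 := fun h => h1 (Or.inl (char_of_toNat_10 c h))
  have h13 : c.toNat ≠ 13 := fun h => h1 (Or.inr (char_of_toNat_13 c h))
  omega

theorem isB_of_break (c : Char) (h1 : c = '\n' ∨ c = '\r') : pvIsB c = true := by
  rcases h1 with h | h <;> subst h <;> decide

theorem break_of_isB (c : Char) (hd : pvDomChar c = true) (hb : pvIsB c = true) :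
    c = '\n' ∨ c = '\r' := by
  by_contra h
  rw [isB_false c hd h] at hb
  exact Bool.false_ne_true hb

theorem go_cons_break (isB : Char → Bool) (c : Char) (rest cur : List Char) (acc : List (List Char))
    (h : ¬ (c = '\x0d' ∧ ∃ r, rest = '\n' :: r)) (hb : isB c = true) :
    PySem.Chars.splitlines.go isB (c :: rest) cur acc
      = PySem.Chars.splitlines.go isB rest [] (cur.reverse :: acc) := by
  rw [PySem.Chars.splitlines.go.eq_def]
  split
  · rename_i heq; exact absurd heq (by simp)
  · rename_i r heq
    injection heq with h1 h2
    exact absurd ⟨h1, by exact ⟨_, h2⟩⟩ h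
  · rename_i c' rest' heq'
    injection heq' with h1 h2
    subst h1; subst h2
    simp [hb]

theorem go_cons_nobreak (isB : Char → Bool) (c : Char) (rest cur : List Char) (acc : List (List Char))
    (h : ¬ (c = '\x0d' ∧ ∃ r, rest = '\n' :: r)) (hb : isB c = false) :
    PySem.Chars.splitlines.go isB (c :: rest) cur acc
      = PySem.Chars.splitlines.go isB rest (c :: cur) acc := by
  rw [PySem.Chars.splitlines.go.eq_def]
  split
  · rename_i heq; exact absurd heq (by simp)
  · rename_i r heq
    injection heq with h1 h2
    exact absurd ⟨h1, by exact ⟨_, h2⟩⟩ h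
  · rename_i c' rest' heq'
    injection heq' with h1 h2
    subst h1; subst h2
    simp [hb]

theorem go_crlf (isB : Char → Bool) (rest cur : List Char) (acc : List (List Char)) :
    PySem.Chars.splitlines.go isB ('\x0d' :: '\n' :: rest) cur acc
      = PySem.Chars.splitlines.go isB rest [] (cur.reverse :: acc) := rfl

theorem go_nil (isB : Char → Bool) (cur : List Char) (acc : List (List Char)) :
    PySem.Chars.splitlines.go isB [] cur acc
      = if cur.isEmpty then acc.reverse else (cur.reverse :: acc).reverse := rfl

theorem amach_crlf (i : Nat) (st : List (Char × Nat)) (rest : List Char) :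
    amach i st ('\r' :: '\n' :: rest) = amach (i + 1) st rest := rfl

theorem amach_cons (i : Nat) (st : List (Char × Nat)) (c : Char) (rest : List Char)
    (h : ¬ (c = '\r' ∧ ∃ r, rest = '\n' :: r)) :
    amach i st (c :: rest)
      = if c = '\n' ∨ c = '\r' then amach (i + 1) st rest else amach i (bpStep i st c) rest := by
  rw [amach.eq_def]
  split
  · rename_i heq; exact absurd heq (by simp)
  · rename_i r heq
    injection heq with h1 h2
    exact absurd ⟨h1, by exact ⟨_, h2⟩⟩ h
  · rename_i c' rest' heq'
    injection heq' with h1 h2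
    subst h1; subst h2
    rfl

theorem bLoop_crlf (rest : List Char) (done : List (List Char)) (cur : List Char)
    (need : List (Char × Nat)) :
    bLoop ('\r' :: '\n' :: rest) done cur need = bLoop rest (done ++ [cur]) [] need := rfl

theorem bLoop_cons (c : Char) (rest : List Char) (done : List (List Char)) (cur : List Char)
    (need : List (Char × Nat)) (h : ¬ (c = '\r' ∧ ∃ r, rest = '\n' :: r)) :
    bLoop (c :: rest) done cur need
      = if c = '\n' ∨ c = '\r' then bLoop rest (done ++ [cur]) [] need
        else bLoop rest done (cur ++ [c]) (bNeedStep done.length need c) := by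
  rw [bLoop.eq_def]
  split
  · rename_i heq; exact absurd heq (by simp)
  · rename_i r heq
    injection heq with h1 h2
    exact absurd ⟨h1, by exact ⟨_, h2⟩⟩ h
  · rename_i c' rest' heq'
    injection heq' with h1 h2
    subst h1; subst h2
    by_cases hnl : c = '\n' ∨ c = '\r'
    · simp only [if_pos hnl]
    · simp only [if_neg hnl]
      unfold bNeedStep
      by_cases hop : c = '(' ∨ c = '{' ∨ c = '['
      · simp only [if_pos hop]
      · simp only [if_neg hop]
        rcases hl : List.getLast? (α := Char × Nat) _ with _ | t
        · rfl
        · by_cases hc : c = t.1 <;> simp [hc]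

theorem bpScan_append (xs ys : List (List Char)) (i : Nat) (st : List (Char × Nat)) :
    bpScan i st (xs ++ ys) = bpScan (i + xs.length) (bpScan i st xs) ys := by
  induction xs generalizing i st with
  | nil => simp [bpScan]
  | cons l xs ih =>
    simp only [List.cons_append, bpScan, ih, List.length_cons]
    rw [show i + (xs.length + 1) = i + 1 + xs.length by omega]

theorem bpScan_singleton (i : Nat) (st : List (Char × Nat)) (l : List Char) :
    bpScan i st [l] = l.foldl (bpStep i) st := rfl

theorem guard_conv (c : Char) (rest : List Char)
    (h : ∀ (r : List Char), c = '\x0d' → rest = '\n' :: r → False) :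
    ¬ (c = '\x0d' ∧ ∃ r, rest = '\n' :: r) := by
  rintro ⟨h1, r, h2⟩; exact h r h1 h2


theorem scan_go (cs cur : List Char) (acc : List (List Char)) :
    cs.all pvDomChar = true → ∀ (i : Nat) (st : List (Char × Nat)),
    bpScan i st (PySem.Chars.splitlines.go pvIsB cs cur acc)
      = amach (i + acc.length) (cur.reverse.foldl (bpStep (i + acc.length)) (bpScan i st acc.reverse)) cs := by
  induction cs, cur, acc using PySem.Chars.splitlines.go.induct pvIsB with
  | case1 cur acc hemp =>
    intro _ i st
    have hc : cur = [] := List.isEmpty_iff.mp hemp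
    subst hc
    rw [go_nil]
    simp [amach]
  | case2 cur acc hemp =>
    intro _ i st
    rw [go_nil, if_neg (by simpa using hemp), List.reverse_cons, bpScan_append]
    simp only [List.length_reverse, bpScan_singleton]
    rfl
  | case3 rest cur acc ih =>
    intro hdom i st
    have hdr : rest.all pvDomChar = true := by
      simp only [List.all_cons, Bool.and_eq_true] at hdom; exact hdom.2.2
    rw [go_crlf, ih hdr i st]
    rw [amach_crlf]
    congr 1
    simp only [List.reverse_cons, bpScan_append, List.length_reverse, bpScan_singleton,
      List.reverse_nil, List.foldl_nil, List.length_cons]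
  | case4 c rest cur acc hg hb ih =>
    intro hdom i st
    simp only [List.all_cons, Bool.and_eq_true] at hdom
    have hbr : c = '\n' ∨ c = '\r' := break_of_isB c hdom.1 hb
    rw [go_cons_break pvIsB c rest cur acc (guard_conv c rest hg) hb,
      ih hdom.2 i st, amach_cons (i + acc.length) _ c rest (guard_conv c rest hg), if_pos hbr]
    congr 1
    simp only [List.reverse_cons, bpScan_append, List.length_reverse, bpScan_singleton,
      List.reverse_nil, List.foldl_nil, List.length_cons]
  | case5 c rest cur acc hg hb ih =>
    intro hdom i st
    simp only [List.all_cons, Bool.and_eq_true] at hdom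
    have hb' : pvIsB c = false := Bool.not_eq_true _ ▸ (by simpa using hb)
    have hnb : ¬ (c = '\n' ∨ c = '\r') := fun h =>
      Bool.false_ne_true (by rw [← hb', isB_of_break c h])
    rw [go_cons_nobreak pvIsB c rest cur acc (guard_conv c rest hg) hb',
      ih hdom.2 i st, amach_cons (i + acc.length) _ c rest (guard_conv c rest hg), if_neg hnb]
    congr 1
    simp only [List.reverse_cons, List.foldl_append, List.foldl_cons, List.foldl_nil]

theorem bLoop_go (cs cur : List Char) (acc : List (List Char)) :
    cs.all pvDomChar = true → ∀ st, openerInv st →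
    bLoop cs acc.reverse cur.reverse (mapStack st)
      = (PySem.Chars.splitlines.go pvIsB cs cur acc, mapStack (amach acc.length st cs)) := by
  induction cs, cur, acc using PySem.Chars.splitlines.go.induct pvIsB with
  | case1 cur acc hemp =>
    intro _ st hinv
    have hc : cur = [] := List.isEmpty_iff.mp hemp
    subst hc
    rw [go_nil]
    simp [bLoop, amach]
  | case2 cur acc hemp =>
    intro _ st hinv
    have hc : cur.reverse ≠ [] := by simpa using hemp
    rw [go_nil, if_neg (by simpa using hemp)]
    simp [bLoop, hc, amach]
  | case3 rest cur acc ih =>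
    intro hdom st hinv
    have hdr : rest.all pvDomChar = true := by
      simp only [List.all_cons, Bool.and_eq_true] at hdom; exact hdom.2.2
    rw [bLoop_crlf, go_crlf, amach_crlf]
    have := ih hdr st hinv
    simp only [List.reverse_cons, List.reverse_nil, List.length_cons] at this ⊢
    rw [← this]
  | case4 c rest cur acc hg hb ih =>
    intro hdom st hinv
    simp only [List.all_cons, Bool.and_eq_true] at hdom
    have hbr : c = '\n' ∨ c = '\r' := break_of_isB c hdom.1 hb
    rw [bLoop_cons c rest _ _ _ (guard_conv c rest hg), if_pos hbr,
      go_cons_break pvIsB c rest cur acc (guard_conv c rest hg) hb,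
      amach_cons _ _ c rest (guard_conv c rest hg), if_pos hbr]
    have := ih hdom.2 st hinv
    simp only [List.reverse_cons, List.reverse_nil, List.length_cons] at this ⊢
    rw [← this]
  | case5 c rest cur acc hg hb ih =>
    intro hdom st hinv
    simp only [List.all_cons, Bool.and_eq_true] at hdom
    have hb' : pvIsB c = false := Bool.not_eq_true _ ▸ (by simpa using hb)
    have hnb : ¬ (c = '\n' ∨ c = '\r') := fun h =>
      Bool.false_ne_true (by rw [← hb', isB_of_break c h])
    have hstep := step_map acc.reverse.length st c hinv
    rw [bLoop_cons c rest _ _ _ (guard_conv c rest hg), if_neg hnb,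
      go_cons_nobreak pvIsB c rest cur acc (guard_conv c rest hg) hb',
      amach_cons _ _ c rest (guard_conv c rest hg), if_neg hnb,
      ← hstep.1]
    have := ih hdom.2 (bpStep acc.reverse.length st c) hstep.2
    simp only [List.reverse_cons, List.length_reverse] at this ⊢
    rw [← this]

-- filtering a line's entries commutes with the opener→closer stack mapping
theorem filter_mapStack (s : List (Char × Nat)) (i : Nat) :
    ((mapStack s).filter (fun p => p.2 == i)).flatMap (fun p => [p.1])
      = (s.filter (fun p => p.2 == i)).flatMap (fun p => [closeOf p.1]) := by
  simp only [← List.map_eq_flatMap, mapStack, List.filter_map, Function.comp_def]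
  rw [List.map_map]
  rfl

-- B's zip-with-extras assembly, pointwise
theorem zip_extra (lines : List (List Char)) (g : Nat → List Char) :
    (lines.zip ((List.replicate lines.length ([] : List Char)).mapIdx (fun i e => e ++ g i))).map
        (fun p => p.1 ++ p.2)
      = lines.mapIdx (fun i line => line ++ g i) := by
  apply List.ext_getElem
  · simp
  · intro i h1 h2
    simp [List.getElem_zip, List.getElem_mapIdx, List.getElem_replicate]

-- ===== VERDICT (by name: the statement is the Claim_ definition above) =====
theorem balance_parentheses_spec : Claim_equal_balance_parentheses := by
  intro content hdom
  unfold Spec_balance_parentheses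
  simp only [balance_parentheses, balance_parentheses_alt]
  have hdom' : content.toList.all pvDomChar = true := hdom
  have hinv0 : openerInv [] := by intro p hp; cases hp
  have hB := bLoop_go content.toList [] [] hdom' [] hinv0
  simp only [List.reverse_nil, List.length_nil] at hB
  have hscan := scan_go content.toList [] [] hdom' 0 []
  simp only [List.reverse_nil, List.foldl_nil, List.length_nil, Nat.add_zero] at hscan
  rw [← splitlines_eq_go] at hB hscan
  -- bpScan 0 [] [] = [] and mapStack [] = []
  have hmape : mapStack [] = [] := rfl
  rw [hmape] at hB
  have hscan0 : bpScan 0 [] ([] : List (List Char)) = [] := rfl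
  rw [hscan0] at hscan
  set cs := content.toList
  set lines := PySem.Chars.splitlines cs with hlines
  set stackA := bpScan 0 [] lines with hstackA
  have hAmach : amach 0 [] cs = stackA := by rw [← hscan]
  rw [hAmach] at hB
  -- A's fixed lines
  have hfix := fix_eq lines stackA (bpScan_inv lines 0 [] (by simp) (by simp))
  rw [hB]
  rw [hfix,
    fold_set_append_eq_mapIdx (fun p : Char × Nat => p.2) (fun p => [closeOf p.1]) stackA lines,
    fold_set_append_eq_mapIdx (fun p : Char × Nat => p.2) (fun p => [p.1]) (mapStack stackA)
      (List.replicate lines.length []),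
    zip_extra lines (fun i => ((mapStack stackA).filter (fun p => p.2 == i)).flatMap (fun p => [p.1]))]
  congr 2
  apply List.ext_getElem
  · simp
  · intro i h1 h2
    simp only [List.getElem_mapIdx, filter_mapStack]
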